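-- pv_equiv track=rewrite | github.com/TomBombadilV/hack-the-interview-ii | maximal-char-requests.py | getMaxCharCount
-- ===== SOURCE A (Python) =====
-- from bisect import bisect_left, bisect_right
-- from collections import defaultdict
-- from typing import List
--
-- def getMaxCharCount(s: str, queries: List[int]) -> List[int]:
--     """
--     Method 3
--     """
--
--     # Takes an interval and the indices of a character and returns the count
--     # of that character within the interval
--     def check_interval(query: List[int], char_indices: List[int]) -> int:
--         lower, upper = query
--         # Force interval into valid indices
--         lower, upper = max(0, lower), min(len(s) - 1, upper)
--         # If lower is greater than upper, the interval is invalid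
--         if lower > upper:
--             return 0
--         # Use binary search to find which char indices the interval contains
--         lower_i = bisect_left(char_indices, lower)
--         upper_i = bisect_right(char_indices, upper)
--         # Return count
--         return upper_i - lower_i
--
--     # Make string all lowercase
--     s = s.lower()
--     # Create dictionary of each char's indices
--     char_dict = defaultdict(list)
--     for i, c in enumerate(s):
--         char_dict[ord(c)].append(i)
--     # Array of each interval's max char count
--     res = [0] * len(queries)
--     # For each character from z to a
--     for c in reversed(range(97, 123)):
--         # If character exists in string
--         if c in char_dict:
--             # Run through list of queries to check if they contain character
--             for query_i, query in enumerate(queries):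
--                 c_indices = char_dict[c]
--                 # If interval hasn't set its highest letter count yet, then
--                 # check if it contains current letter
--                 if not(res[query_i]):
--                     res[query_i] = check_interval(query, c_indices)
--     # Return array of max char counts
--     return res
-- ===== SOURCE B (Python) =====
-- def getMaxCharCount(s, queries):
--     # Per query: slice out the clamped interval once, take the alphabetically
--     # greatest letter in it and count its occurrences there.
--     t = s.lower()
--     n = len(t)
--     res = []
--     for lower, upper in queries:
--         lo, hi = max(0, lower), min(n - 1, upper)
--         seg = t[lo:hi + 1] if lo <= hi else ''
--         letters = [c for c in seg if 'a' <= c <= 'z']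
--         res.append(seg.count(max(letters)) if letters else 0)
--     return res
-- ===== Notes on version B (the rewrite author's own statement) =====
-- stated objective: simpler
-- what changed: Replaces the per-character index lists, the binary searches and the 26-pass mutation of a shared result array with a single direct pass per query: slice the clamped interval once, take its maximum letter and count its occurrences in the slice.
import Mathlib
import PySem

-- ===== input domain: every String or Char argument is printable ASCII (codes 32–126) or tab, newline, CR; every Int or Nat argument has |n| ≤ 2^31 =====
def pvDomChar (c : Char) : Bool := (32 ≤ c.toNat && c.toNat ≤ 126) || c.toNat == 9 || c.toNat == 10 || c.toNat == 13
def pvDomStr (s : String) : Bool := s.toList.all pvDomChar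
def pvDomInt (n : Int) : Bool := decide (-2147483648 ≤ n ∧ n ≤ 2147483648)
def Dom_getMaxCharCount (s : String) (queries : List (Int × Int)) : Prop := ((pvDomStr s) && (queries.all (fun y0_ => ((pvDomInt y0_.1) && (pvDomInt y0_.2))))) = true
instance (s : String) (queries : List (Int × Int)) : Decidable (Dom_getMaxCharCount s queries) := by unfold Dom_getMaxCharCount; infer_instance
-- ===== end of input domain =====

-- B answers each query directly — slice the clamped interval once, take its maximum letter and
-- count it — instead of A's 26 per-character index lists, binary searches and shared result array
-- mutated over 26 passes; objective: simpler (same exact results, no speed claim).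

-- ===== PORT A =====
-- Literal port of A: lowered string, defaultdict of per-character index lists built over
-- enumerate, result array of zeros, character codes scanned z..a, inner pass over
-- enumerate(queries) setting a slot only while it is 0.  bisect_left/bisect_right are the
-- stdlib calls, ported as PySem.List.bisectLeft/bisectRight; ord c is c.toNat (exact).
def getMaxCharCount (s : String) (queries : List (Int × Int)) : List Int :=
  let t := (PySem.Str.lower s).toList
  -- check_interval(query, char_indices)
  let check : (Int × Int) → List Int → Int := fun q charIndices =>
    let lower := max 0 q.1
    let upper := min ((t.length : Int) - 1) q.2
    if lower > upper then 0
    else (PySem.List.bisectRight charIndices upper : Int) - (PySem.List.bisectLeft charIndices lower : Int)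
  let charDict : PySem.Dict Int (List Int) :=
    (PySem.List.enumerate t).foldl (fun d p => d.modify ((p.2.toNat : Int)) [] (· ++ [p.1])) PySem.Dict.empty
  let res0 : List Int := List.replicate queries.length 0
  ((PySem.List.pyRange 97 123 1).reverse).foldl
    (fun res c =>
      if charDict.contains c then
        (PySem.List.enumerate queries).foldl
          (fun res p =>
            let cIndices := charDict.getD c []
            if PySem.List.pyGetD res p.1 0 == 0 then
              PySem.List.pySetD res p.1 (check p.2 cIndices)
            else res)
          res
      else res)
    res0

-- ===== PORT B =====
-- Literal port of Source B: one pass over the queries, appending each answer.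
def getMaxCharCount_alt (s : String) (queries : List (Int × Int)) : List Int :=
  let t := (PySem.Str.lower s).toList
  let n : Int := t.length
  queries.foldl
    (fun res q =>
      let lo := max 0 q.1
      let hi := min (n - 1) q.2
      let seg := if lo ≤ hi then PySem.List.slice t (some lo) (some (hi + 1)) else []
      let letters := seg.filter (fun c => decide ('a' ≤ c) && decide (c ≤ 'z'))
      res ++ [match PySem.List.max? letters (fun c => c) with
              | some m => (PySem.List.count seg m : Int)
              | none => 0])
    []

-- ===== PRECONDITION & SPEC =====
def Spec_getMaxCharCount (s : String) (queries : List (Int × Int)) (out : List Int) : Prop := out = getMaxCharCount_alt s queries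
instance (s : String) (queries : List (Int × Int)) (out : List Int) : Decidable (Spec_getMaxCharCount s queries out) := by unfold Spec_getMaxCharCount; infer_instance

-- ===== CLAIM (what is proved, stated in full; the proofs are below) =====
def Claim_equal_getMaxCharCount : Prop := ∀ (s : String) (queries : List (Int × Int)), Dom_getMaxCharCount s queries → Spec_getMaxCharCount s queries (getMaxCharCount s queries)

-- ===== LEMMAS AND PROOFS =====

-- The character code of a Lean Char, as Python's ord.
def pvCode (ch : Char) : Int := (ch.toNat : Int)

-- The clamped slice s[lo:hi+1] both programs reason about.
def pvSeg (t : List Char) (q : Int × Int) : List Char :=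
  let lo := max 0 q.1
  let hi := min ((t.length : Int) - 1) q.2
  if lo ≤ hi then (t.drop lo.toNat).take ((hi + 1).toNat - lo.toNat) else []

-- Number of occurrences of character code c inside the clamped interval.
def pvCnt (t : List Char) (c : Int) (q : Int × Int) : Int :=
  ((pvSeg t q).countP (fun ch => pvCode ch == c) : Int)

-- First nonzero pvCnt along a list of codes (A's overwrite-while-zero discipline).
def pvPick (t : List Char) (q : Int × Int) : List Int → Int
  | [] => 0
  | c :: rest => if pvCnt t c q == 0 then pvPick t q rest else pvCnt t c q

-- The list of positions of code c in t, as A's char_dict stores it.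
def pvIdx (t : List Char) (c : Int) : List Int :=
  ((List.range t.length).filter (fun j => pvCode (t.getD j ' ') == c)).map (fun (j : Nat) => (j : Int))

-- Interval count of positions: the common range form of both counts.
def pvW (t : List Char) (c : Int) (q : Int × Int) : Int :=
  ((List.range t.length).countP (fun (j : Nat) =>
      decide (max 0 q.1 ≤ (j : Int)) && decide ((j : Int) ≤ min ((t.length : Int) - 1) q.2)
        && (pvCode (t.getD j ' ') == c)) : Int)

-- A's pieces, restated as named functions (definitionally the let-bound lambdas of the port).
def pvCheck (t : List Char) (q : Int × Int) (charIndices : List Int) : Int :=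
  let lower := max 0 q.1
  let upper := min ((t.length : Int) - 1) q.2
  if lower > upper then 0
  else (PySem.List.bisectRight charIndices upper : Int) - (PySem.List.bisectLeft charIndices lower : Int)

def pvDict (t : List Char) : PySem.Dict Int (List Int) :=
  (PySem.List.enumerate t).foldl (fun d p => d.modify ((p.2.toNat : Int)) [] (· ++ [p.1])) PySem.Dict.empty

def pvStep (t : List Char) (queries : List (Int × Int)) (res : List Int) (c : Int) : List Int :=
  if (pvDict t).contains c then
    (PySem.List.enumerate queries).foldl
      (fun res p =>
        let cIndices := (pvDict t).getD c []
        if PySem.List.pyGetD res p.1 0 == 0 then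
          PySem.List.pySetD res p.1 (pvCheck t p.2 cIndices)
        else res)
      res
  else res

-- B's per-query value.
def pvB (t : List Char) (q : Int × Int) : Int :=
  let lo := max 0 q.1
  let hi := min ((t.length : Int) - 1) q.2
  let seg := if lo ≤ hi then PySem.List.slice t (some lo) (some (hi + 1)) else []
  let letters := seg.filter (fun c => decide ('a' ≤ c) && decide (c ≤ 'z'))
  match PySem.List.max? letters (fun c => c) with
  | some m => (PySem.List.count seg m : Int)
  | none => 0

-- Char facts
theorem pv_char_eq_of_toNat (a b : Char) (h : a.toNat = b.toNat) : a = b := by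
  apply Char.ext; exact UInt32.toNat_inj.mp h

theorem pv_char_le_iff (a b : Char) : a ≤ b ↔ a.toNat ≤ b.toNat := by
  rw [Char.le_def]; exact UInt32.le_iff_toNat_le

-- countP of a window of a list as a countP over its index range
theorem pv_countP_take_drop {α : Type} (d : α) (p : α → Bool) :
    ∀ (t : List α) (a m : Nat), ((t.drop a).take m).countP p
      = (List.range t.length).countP (fun j => decide (a ≤ j) && decide (j < a + m) && p (t.getD j d)) := by
  intro t
  induction t with
  | nil => intro a m; simp
  | cons x t ih =>
    intro a m
    simp only [List.length_cons, List.range_succ_eq_map, List.countP_cons, List.countP_map]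
    cases a with
    | zero =>
      cases m with
      | zero => simp
      | succ m' =>
        simp only [List.drop_zero, List.take_succ_cons, List.countP_cons]
        have h := ih 0 m'
        simp only [List.drop_zero] at h
        rw [h]
        have hc : ∀ j ∈ List.range t.length,
            ((fun j => decide (0 ≤ j) && decide (j < 0 + m') && p (t.getD j d)) j = true ↔
             ((fun j => decide (0 ≤ j) && decide (j < 0 + (m'+1)) && p ((x::t).getD j d)) ∘ Nat.succ) j = true) := by
          intro j hj
          simp only [Function.comp_apply, List.getD_cons_succ, Nat.zero_le, decide_true,
            Bool.true_and, Bool.and_eq_true, decide_eq_true_eq]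
          constructor <;> (rintro ⟨h1, h2⟩; exact ⟨by omega, h2⟩)
        rw [List.countP_congr hc]
        simp
    | succ a' =>
      simp only [List.drop_succ_cons]
      rw [ih a' m]
      have hc : ∀ j ∈ List.range t.length,
          ((fun j => decide (a' ≤ j) && decide (j < a' + m) && p (t.getD j d)) j = true ↔
           ((fun j => decide (a'+1 ≤ j) && decide (j < a'+1 + m) && p ((x::t).getD j d)) ∘ Nat.succ) j = true) := by
        intro j hj
        simp only [Function.comp_apply, List.getD_cons_succ, Bool.and_eq_true, decide_eq_true_eq]
        constructor <;> (rintro ⟨⟨h1, h2⟩, h3⟩; exact ⟨⟨by omega, by omega⟩, h3⟩)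
      rw [List.countP_congr hc]
      simp

-- disjoint countP split
theorem pv_countP_or {α : Type} (p q : α → Bool) (l : List α)
    (h : ∀ x ∈ l, p x = true → q x = false) :
    l.countP (fun x => p x || q x) = l.countP p + l.countP q := by
  induction l with
  | nil => simp
  | cons x l ih =>
    simp only [List.countP_cons, ih (fun y hy => h y (List.mem_cons_of_mem x hy))]
    have := h x (List.mem_cons_self)
    cases hp : p x <;> cases hq : q x <;> simp_all <;> omega

theorem pv_countP_range {α : Type} (d : α) (p : α → Bool) (l : List α) :
    l.countP p = (List.range l.length).countP (fun j => p (l.getD j d)) := by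
  have h := pv_countP_take_drop d p l 0 l.length
  simp only [List.drop_zero, List.take_length] at h
  rw [h]
  apply List.countP_congr
  intro j hj
  have := List.mem_range.mp hj
  simp [this]

theorem pv_countP_range_lt (n k : Nat) (hk : k ≤ n) :
    (List.range n).countP (fun j => decide (j < k)) = k := by
  have : n = k + (n - k) := by omega
  rw [this, List.range_add, List.countP_append, List.countP_map]
  have h1 : (List.range k).countP (fun j => decide (j < k)) = (List.range k).countP (fun _ => true) := by
    apply List.countP_congr; intro j hj
    simp [List.mem_range.mp hj]
  have h2 : (List.range (n-k)).countP ((fun j => decide (j < k)) ∘ (k + ·)) = 0 := by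
    apply List.countP_eq_zero.mpr; intro j hj; simp
  simp [h1, h2]

theorem pv_bisectLeft_eq (I : List Int) (x : Int) (hs : I.Pairwise (· ≤ ·)) :
    PySem.List.bisectLeft I x = I.countP (fun y => decide (y < x)) := by
  obtain ⟨hle, hlt, hge⟩ := PySem.List.bisectLeft_spec I x hs
  rw [pv_countP_range 0 _ I]
  have hc : ∀ j ∈ List.range I.length,
      ((fun j => decide (I.getD j 0 < x)) j = true ↔ (fun j => decide (j < PySem.List.bisectLeft I x)) j = true) := by
    intro j hj
    have hjl := List.mem_range.mp hj
    simp only [decide_eq_true_eq, List.getD_eq_getElem I 0 hjl]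
    constructor
    · intro hlt'; by_contra hno
      exact absurd (hge j hjl (by omega)) (by omega)
    · intro h'; exact hlt j hjl h'
  rw [List.countP_congr hc, pv_countP_range_lt _ _ hle]

theorem pv_bisectRight_eq (I : List Int) (x : Int) (hs : I.Pairwise (· ≤ ·)) :
    PySem.List.bisectRight I x = I.countP (fun y => decide (y ≤ x)) := by
  obtain ⟨hle, hlt, hge⟩ := PySem.List.bisectRight_spec I x hs
  rw [pv_countP_range 0 _ I]
  have hc : ∀ j ∈ List.range I.length,
      ((fun j => decide (I.getD j 0 ≤ x)) j = true ↔ (fun j => decide (j < PySem.List.bisectRight I x)) j = true) := by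
    intro j hj
    have hjl := List.mem_range.mp hj
    simp only [decide_eq_true_eq, List.getD_eq_getElem I 0 hjl]
    constructor
    · intro hlt'; by_contra hno
      exact absurd (hge j hjl (by omega)) (by omega)
    · intro h'; exact hlt j hjl h'
  rw [List.countP_congr hc, pv_countP_range_lt _ _ hle]

-- A's char_dict holds exactly the position lists pvIdx.
theorem pv_dict_getD (t : List Char) (c : Int) : (pvDict t).getD c [] = pvIdx t c := by
  unfold pvDict pvIdx
  have hfold : (PySem.List.enumerate t).foldl
        (fun (d : PySem.Dict Int (List Int)) (p : Int × Char) => d.modify ((p.2.toNat : Int)) [] (· ++ [p.1]))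
        PySem.Dict.empty
      = ((PySem.List.enumerate t).map (fun (p : Int × Char) => ((p.2.toNat : Int), p.1))).foldl
        (fun (d : PySem.Dict Int (List Int)) (r : Int × Int) => d.modify r.1 [] (· ++ [r.2]))
        PySem.Dict.empty := by
    rw [List.foldl_map]
  rw [hfold, PySem.Dict.getD_foldl_modify_append, List.filter_map, List.map_map]
  rw [PySem.List.enumerate_eq_map_pyRange t ' ', PySem.List.len_eq, PySem.List.pyRange_zero_nat]
  rw [List.map_map, List.filter_map, List.map_map]
  simp [Function.comp_def, pvCode, PySem.List.pyGetD_natCast, PySem.Dict.getD_empty]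

theorem pv_idx_sorted (t : List Char) (c : Int) : (pvIdx t c).Pairwise (· ≤ ·) := by
  unfold pvIdx
  apply List.Pairwise.map (fun (j : Nat) => (j : Int))
    (fun a b (h : a < b) => by simpa using (Nat.cast_le.mpr (Nat.le_of_lt h) : ((a : Int) ≤ b)))
  exact List.Pairwise.filter _ List.pairwise_lt_range

-- A's check_interval value over the stored positions, in range form.
theorem pv_check_eq (t : List Char) (c : Int) (q : Int × Int) :
    pvCheck t q (pvIdx t c) = pvW t c q := by
  unfold pvCheck pvW
  by_cases hcase : max 0 q.1 > min ((t.length : Int) - 1) q.2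
  · rw [if_pos hcase]
    have hz : (List.range t.length).countP (fun (j : Nat) =>
        decide (max 0 q.1 ≤ (j : Int)) && decide ((j : Int) ≤ min ((t.length : Int) - 1) q.2)
          && (pvCode (t.getD j ' ') == c)) = 0 := by
      apply List.countP_eq_zero.mpr
      intro j _ hj
      simp only [Bool.and_eq_true, decide_eq_true_eq] at hj
      omega
    rw [hz]
    simp
  · rw [if_neg hcase]
    have hs := pv_idx_sorted t c
    rw [pv_bisectRight_eq _ _ hs, pv_bisectLeft_eq _ _ hs]
    have hR : (pvIdx t c).countP (fun y => decide (y ≤ min ((t.length : Int) - 1) q.2))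
        = (List.range t.length).countP (fun (j : Nat) =>
            decide ((j : Int) ≤ min ((t.length : Int) - 1) q.2) && (pvCode (t.getD j ' ') == c)) := by
      unfold pvIdx
      rw [List.countP_map, List.countP_filter]
      apply List.countP_congr
      intro j _
      simp [Function.comp]
    have hL : (pvIdx t c).countP (fun y => decide (y < max 0 q.1))
        = (List.range t.length).countP (fun (j : Nat) =>
            decide ((j : Int) < max 0 q.1) && (pvCode (t.getD j ' ') == c)) := by
      unfold pvIdx
      rw [List.countP_map, List.countP_filter]
      apply List.countP_congr
      intro j _
      simp [Function.comp]
    rw [hR, hL]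
    have hsplit : (List.range t.length).countP (fun (j : Nat) =>
            decide ((j : Int) ≤ min ((t.length : Int) - 1) q.2) && (pvCode (t.getD j ' ') == c))
        = (List.range t.length).countP (fun (j : Nat) =>
            decide ((j : Int) < max 0 q.1) && (pvCode (t.getD j ' ') == c))
        + (List.range t.length).countP (fun (j : Nat) =>
            decide (max 0 q.1 ≤ (j : Int)) && decide ((j : Int) ≤ min ((t.length : Int) - 1) q.2)
              && (pvCode (t.getD j ' ') == c)) := by
      rw [← pv_countP_or (fun (j : Nat) => decide ((j : Int) < max 0 q.1) && (pvCode (t.getD j ' ') == c))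
            (fun (j : Nat) => decide (max 0 q.1 ≤ (j : Int)) && decide ((j : Int) ≤ min ((t.length : Int) - 1) q.2)
              && (pvCode (t.getD j ' ') == c))
            (List.range t.length) (by
        intro j _ hj
        simp only [Bool.and_eq_true, decide_eq_true_eq] at hj
        simp only [Bool.and_eq_true, decide_eq_true_eq, Bool.eq_false_iff, ne_eq, not_and]
        intro h1
        omega)]
      apply List.countP_congr
      intro j _
      simp only [Bool.or_eq_true, Bool.and_eq_true, decide_eq_true_eq]
      constructor
      · rintro ⟨h1, h2⟩
        by_cases hlt : (j : Int) < max 0 q.1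
        · exact Or.inl ⟨hlt, h2⟩
        · exact Or.inr ⟨⟨by omega, h1⟩, h2⟩
      · rintro (⟨h1, h2⟩ | ⟨⟨h1, h1b⟩, h2⟩)
        · exact ⟨by omega, h2⟩
        · exact ⟨h1b, h2⟩
    omega

-- B-side count of a code in the clamped slice, in the same range form.
theorem pv_cnt_eq (t : List Char) (c : Int) (q : Int × Int) : pvCnt t c q = pvW t c q := by
  unfold pvCnt pvSeg pvW
  by_cases h : max 0 q.1 ≤ min ((t.length : Int) - 1) q.2
  · simp only [if_pos h]
    rw [pv_countP_take_drop ' ' _ t]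
    congr 1
    apply List.countP_congr
    intro j _
    simp only [Bool.and_eq_true, decide_eq_true_eq]
    constructor
    · rintro ⟨⟨h1, h2⟩, h3⟩
      exact ⟨⟨by omega, by omega⟩, h3⟩
    · rintro ⟨⟨h1, h2⟩, h3⟩
      exact ⟨⟨by omega, by omega⟩, h3⟩
  · simp only [if_neg h]
    have hz : (List.range t.length).countP (fun (j : Nat) =>
        decide (max 0 q.1 ≤ (j : Int)) && decide ((j : Int) ≤ min ((t.length : Int) - 1) q.2)
          && (pvCode (t.getD j ' ') == c)) = 0 := by
      apply List.countP_eq_zero.mpr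
      intro j _ hj
      simp only [Bool.and_eq_true, decide_eq_true_eq] at hj
      omega
    rw [hz]
    simp

-- A code absent from the dict has count 0 in every interval.
theorem pv_cnt_zero_of_not_contains (t : List Char) (c : Int) (q : Int × Int)
    (h : (pvDict t).contains c = false) : pvCnt t c q = 0 := by
  have hidx : pvIdx t c = [] := by
    rw [← pv_dict_getD]
    exact PySem.Dict.getD_of_not_contains _ _ h
  have hzero : (List.range t.length).countP (fun j => pvCode (t.getD j ' ') == c) = 0 := by
    have hlen := congrArg List.length hidx
    unfold pvIdx at hlen
    simpa [List.countP_eq_length_filter] using hlen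
  rw [pv_cnt_eq]
  unfold pvW
  have hle : (List.range t.length).countP (fun (j : Nat) =>
      decide (max 0 q.1 ≤ (j : Int)) && decide ((j : Int) ≤ min ((t.length : Int) - 1) q.2)
        && (pvCode (t.getD j ' ') == c))
      ≤ (List.range t.length).countP (fun j => pvCode (t.getD j ' ') == c) := by
    apply List.countP_mono_left
    intro j _ hj
    simp only [Bool.and_eq_true] at hj
    exact hj.2
  omega

-- The inner loop over enumerate(queries) acts pointwise.
theorem pv_inner (f : (Int × Int) → Int) :
    ∀ (qs : List (Int × Int)) (pre cur : List Int), cur.length = qs.length →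
    (PySem.List.enumerate qs (pre.length : Int)).foldl
      (fun res p => if PySem.List.pyGetD res p.1 0 == 0 then PySem.List.pySetD res p.1 (f p.2) else res)
      (pre ++ cur)
    = pre ++ cur.zipWith (fun r q => if r == 0 then f q else r) qs := by
  intro qs
  induction qs with
  | nil =>
    intro pre cur h
    rw [List.length_eq_zero_iff.mp h]
    simp [PySem.List.enumerate_nil]
  | cons q qs ih =>
    intro pre cur h
    cases cur with
    | nil => simp at h
    | cons r cur' =>
      rw [PySem.List.enumerate_cons]
      simp only [List.foldl_cons]
      have hget : PySem.List.pyGetD (pre ++ r :: cur') ((pre.length : Int)) 0 = r := by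
        rw [PySem.List.pyGetD_natCast]
        simp [List.getD_eq_getElem?_getD]
      have hset : PySem.List.pySetD (pre ++ r :: cur') ((pre.length : Int)) (f q) = pre ++ f q :: cur' := by
        rw [PySem.List.pySetD_natCast]
        rw [List.set_append_right _ _ (le_refl pre.length)]
        simp
      have hlen : ((pre.length : Int)) + 1 = (((pre ++ [if r == 0 then f q else r]).length : Nat) : Int) := by
        simp
      have hstate : (if PySem.List.pyGetD (pre ++ r :: cur') ((pre.length : Int)) 0 == 0 then
            PySem.List.pySetD (pre ++ r :: cur') ((pre.length : Int)) (f q) else pre ++ r :: cur')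
          = (pre ++ [if r == 0 then f q else r]) ++ cur' := by
        rw [hget]
        by_cases hr : r == 0
        · simp only [hr, if_true, hset]
          simp
        · rw [if_neg (by simpa using hr)]
          simp only [Bool.not_eq_true] at hr
          simp [hr]
      rw [hstate, hlen, ih (pre ++ [if r == 0 then f q else r]) cur' (by simpa using h)]
      simp [List.zipWith_cons_cons]

theorem pv_pick_append (t : List Char) (q : Int × Int) :
    ∀ P L, pvPick t q (P ++ L) = if pvPick t q P == 0 then pvPick t q L else pvPick t q P := by
  intro P
  induction P with
  | nil => intro L; simp [pvPick]
  | cons c P ih =>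
    intro L
    simp only [List.cons_append, pvPick]
    by_cases hc : pvCnt t c q == 0
    · simp [hc, ih]
    · simp [hc]

theorem pv_pick_zero (t : List Char) (q : Int × Int) :
    ∀ L, (∀ c ∈ L, pvCnt t c q = 0) → pvPick t q L = 0 := by
  intro L
  induction L with
  | nil => intro _; rfl
  | cons c L ih =>
    intro h
    have hc : pvCnt t c q = 0 := h c List.mem_cons_self
    simp only [pvPick, hc]
    simpa using ih (fun x hx => h x (List.mem_cons_of_mem c hx))

-- One outer step moves every slot from pvPick P to pvPick (P ++ [c]).
theorem pv_step_eq (t : List Char) (queries : List (Int × Int)) (P : List Int) (c : Int) :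
    pvStep t queries (queries.map (fun q => pvPick t q P)) c
      = queries.map (fun q => pvPick t q (P ++ [c])) := by
  have hpc : ∀ q, pvPick t q (P ++ [c]) = if pvPick t q P == 0 then pvCnt t c q else pvPick t q P := by
    intro q
    rw [pv_pick_append]
    by_cases hcz : pvCnt t c q == 0
    · simp only [pvPick, hcz, if_true]
      simp only [beq_iff_eq] at hcz
      by_cases hp : pvPick t q P == 0 <;> simp [hp, hcz]
    · simp [pvPick, hcz]
  unfold pvStep
  by_cases hc : (pvDict t).contains c
  · rw [if_pos hc]
    have h := pv_inner (fun q => pvCheck t q ((pvDict t).getD c [])) queries []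
      (queries.map (fun q => pvPick t q P)) (by simp)
    simp only [List.length_nil, Nat.cast_zero, List.nil_append] at h
    show (PySem.List.enumerate queries).foldl
        (fun res p => if PySem.List.pyGetD res p.1 0 == 0 then
          PySem.List.pySetD res p.1 (pvCheck t p.2 ((pvDict t).getD c [])) else res)
        (queries.map (fun q => pvPick t q P)) = _
    rw [h, List.zipWith_map_left, List.zipWith_self]
    apply List.map_congr_left
    intro q _
    rw [hpc q, pv_dict_getD, pv_check_eq, ← pv_cnt_eq]
  · rw [if_neg hc]
    apply List.map_congr_left
    intro q _
    rw [hpc q, pv_cnt_zero_of_not_contains t c q (by simpa using hc)]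
    by_cases hp : pvPick t q P = 0
    · simp [hp]
    · simp [hp]

theorem pv_loop (t : List Char) (queries : List (Int × Int)) :
    ∀ (L P : List Int), L.foldl (pvStep t queries) (queries.map (fun q => pvPick t q P))
      = queries.map (fun q => pvPick t q (P ++ L)) := by
  intro L
  induction L with
  | nil => intro P; simp
  | cons c L ih =>
    intro P
    simp only [List.foldl_cons]
    rw [pv_step_eq, ih (P ++ [c])]
    simp

-- A as a map.
theorem pvA_eq (s : String) (queries : List (Int × Int)) :
    getMaxCharCount s queries
      = queries.map (fun q => pvPick (PySem.Str.lower s).toList q ((PySem.List.pyRange 97 123 1).reverse)) := by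
  have h0 : List.replicate queries.length (0 : Int)
      = queries.map (fun q => pvPick (PySem.Str.lower s).toList q []) := by
    rw [show (fun q => pvPick (PySem.Str.lower s).toList q []) = (fun (_ : Int × Int) => (0 : Int)) from rfl,
      List.map_const']
  show ((PySem.List.pyRange 97 123 1).reverse).foldl (pvStep (PySem.Str.lower s).toList queries)
      (List.replicate queries.length 0) = _
  rw [h0, pv_loop]
  simp

-- B as a map.
theorem pvB_eq (s : String) (queries : List (Int × Int)) :
    getMaxCharCount_alt s queries = queries.map (pvB (PySem.Str.lower s).toList) := by
  show queries.foldl (fun res q => res ++ [pvB (PySem.Str.lower s).toList q]) [] = _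
  rw [PySem.List.foldl_append_singleton_eq_map]
  simp

-- Per query, A's first-nonzero scan from 'z' down equals B's count of the maximum letter.
theorem pv_query_eq (t : List Char) (q : Int × Int) :
    pvPick t q ((PySem.List.pyRange 97 123 1).reverse) = pvB t q := by
  have ha : 'a'.toNat = 97 := rfl
  have hzc : 'z'.toNat = 122 := rfl
  have hseg : (if max 0 q.1 ≤ min ((t.length : Int) - 1) q.2 then
        PySem.List.slice t (some (max 0 q.1)) (some (min ((t.length : Int) - 1) q.2 + 1)) else [])
      = pvSeg t q := by
    unfold pvSeg
    by_cases h : max 0 q.1 ≤ min ((t.length : Int) - 1) q.2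
    · rw [if_pos h, if_pos h, PySem.List.slice_toNat t (by omega) (by omega)]
    · rw [if_neg h, if_neg h]
  simp only [pvB]
  rw [hseg]
  cases hmax : PySem.List.max? ((pvSeg t q).filter (fun c => decide ('a' ≤ c) && decide (c ≤ 'z'))) (fun c => c) with
  | none =>
    have hl : (pvSeg t q).filter (fun c => decide ('a' ≤ c) && decide (c ≤ 'z')) = [] :=
      (PySem.List.max?_eq_none_iff _ _).mp hmax
    apply pv_pick_zero
    intro c hc
    have hcr := (PySem.List.mem_pyRange_one).mp (List.mem_reverse.mp hc)
    have h0 : (pvSeg t q).countP (fun ch => pvCode ch == c) = 0 := by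
      apply List.countP_eq_zero.mpr
      intro ch hch hP
      have hcode : pvCode ch = c := by simpa using hP
      have hbnd : 97 ≤ ch.toNat ∧ ch.toNat ≤ 122 := by
        unfold pvCode at hcode
        omega
      have hmem : ch ∈ (pvSeg t q).filter (fun c => decide ('a' ≤ c) && decide (c ≤ 'z')) := by
        apply List.mem_filter.mpr
        refine ⟨hch, ?_⟩
        simp only [Bool.and_eq_true, decide_eq_true_eq, pv_char_le_iff]
        omega
      rw [hl] at hmem
      exact absurd hmem (List.not_mem_nil)
    simp [pvCnt, h0]
  | some m =>
    have hmem := PySem.List.max?_mem hmax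
    have hmseg : m ∈ pvSeg t q := (List.mem_filter.mp hmem).1
    have hmbnd : 97 ≤ m.toNat ∧ m.toNat ≤ 122 := by
      have h := (List.mem_filter.mp hmem).2
      simp only [Bool.and_eq_true, decide_eq_true_eq, pv_char_le_iff] at h
      omega
    have hmaxle := PySem.List.max?_isMax hmax
    have hk1 : (97 : Int) ≤ pvCode m ∧ pvCode m ≤ 122 := by
      unfold pvCode
      omega
    have hsplitR : PySem.List.pyRange 97 123 1
        = PySem.List.pyRange 97 (pvCode m) 1 ++ (pvCode m :: PySem.List.pyRange (pvCode m + 1) 123 1) := by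
      rw [← PySem.List.pyRange_one_cons (show pvCode m < 123 by omega)]
      exact PySem.List.pyRange_one_append 97 (pvCode m) 123 (by omega) (by omega)
    rw [hsplitR, List.reverse_append, List.reverse_cons, List.append_assoc, List.singleton_append]
    rw [pv_pick_append]
    have hz : pvPick t q (PySem.List.pyRange (pvCode m + 1) 123 1).reverse = 0 := by
      apply pv_pick_zero
      intro c hc
      have hcr := (PySem.List.mem_pyRange_one).mp (List.mem_reverse.mp hc)
      have h0 : (pvSeg t q).countP (fun ch => pvCode ch == c) = 0 := by
        apply List.countP_eq_zero.mpr
        intro ch hch hP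
        have hcode : pvCode ch = c := by simpa using hP
        have hbnd : 97 ≤ ch.toNat ∧ ch.toNat ≤ 122 := by
          unfold pvCode at hcode
          omega
        have hmem2 : ch ∈ (pvSeg t q).filter (fun c => decide ('a' ≤ c) && decide (c ≤ 'z')) := by
          apply List.mem_filter.mpr
          refine ⟨hch, ?_⟩
          simp only [Bool.and_eq_true, decide_eq_true_eq, pv_char_le_iff]
          omega
        have hle : ch ≤ m := hmaxle ch hmem2
        rw [pv_char_le_iff] at hle
        unfold pvCode at hcode hcr
        omega
      simp [pvCnt, h0]
    rw [hz]
    have hpos : (pvCnt t (pvCode m) q == 0) = false := by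
      have hp : 0 < (pvSeg t q).countP (fun ch => pvCode ch == pvCode m) :=
        List.countP_pos_iff.mpr ⟨m, hmseg, by simp⟩
      simp only [pvCnt, beq_eq_false_iff_ne, ne_eq, Nat.cast_eq_zero]
      omega
    simp only [beq_self_eq_true, if_true, pvPick, hpos, Bool.false_eq_true, if_false]
    unfold pvCnt
    rw [PySem.List.count_eq]
    have hcp : List.count m (pvSeg t q) = (pvSeg t q).countP (fun ch => pvCode ch == pvCode m) := by
      rw [List.count_eq_countP]
      apply List.countP_congr
      intro ch _
      simp only [beq_iff_eq]
      constructor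
      · intro h; rw [h]
      · intro h
        apply pv_char_eq_of_toNat
        unfold pvCode at h
        omega
    rw [hcp]

-- ===== VERDICT (by name: the statement is the Claim_ definition above) =====
theorem getMaxCharCount_spec : Claim_equal_getMaxCharCount := by
  intro s queries _
  unfold Spec_getMaxCharCount
  rw [pvA_eq, pvB_eq]
  exact List.map_congr_left (fun q _ => pv_query_eq _ q)
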